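-- pv_equiv track=rewrite | github.com/pv-230/canvas2-web-app | canvas2/plagiarism/simhash/similarsubstrings.py | getSimilarSentences
-- ===== SOURCE A (Python) =====
-- def getStringDifference(s1: str, s2: str) -> int:
--     """
--     Return the number of chars that are different between two strings
--     """
--     return sum(x != y for x, y in zip(s1, s2))
--
-- def getSimilarSentences(hash1: list, hash2: list, k=8) -> list:
--     """
--     Return a list of sentences that are similar to the input sentence
--     """
--     similarSentences = []
--     paired1, paired2 = set(), set()
--
--     # iterate through first hash set and if a hash with a difference of i is found in the other set
--     # create a pair and move to next sentence do this for all i in range(k)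
--     for i in range(0, k + 1):
--         for idx, sentenceHash in hash1:
--             if idx not in paired1:
--                 for idx2, sentenceHash2 in hash2:
--                     if idx2 not in paired2:
--                         currDiff = getStringDifference(
--                             sentenceHash, sentenceHash2)
--                         if currDiff == i:
--                             similarSentences.append((idx, idx2))
--                             paired1.add(idx)
--                             paired2.add(idx2)
--                             break
--     return similarSentences
-- ===== SOURCE B (Python) =====
-- def getStringDifference(s1: str, s2: str) -> int:
--     return sum(x != y for x, y in zip(s1, s2))
--
-- def getSimilarSentences(hash1: list, hash2: list, k=8) -> list:
--     # Precompute each cross-pair's distance once, bucketed by distance,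
--     # then do one greedy pass per (nonempty) distance level in increasing order.
--     buckets = {}
--     for idx, h in hash1:
--         for idx2, h2 in hash2:
--             d = getStringDifference(h, h2)
--             if d <= k:
--                 buckets.setdefault(d, []).append((idx, idx2))
--     out = []
--     paired1, paired2 = set(), set()
--     for d in sorted(buckets):
--         for idx, idx2 in buckets[d]:
--             if idx not in paired1 and idx2 not in paired2:
--                 out.append((idx, idx2))
--                 paired1.add(idx)
--                 paired2.add(idx2)
--     return out
-- ===== Notes on version B (the rewrite author's own statement) =====
-- stated objective: faster
-- what changed: B computes each cross-pair's Hamming distance once and buckets the pairs by distance in hash1-major order, then greedily sweeps the nonempty distance levels in increasing order, instead of A's re-scanning all of hash1 x hash2 and recomputing every distance at each of the k+1 levels.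
import Mathlib
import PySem

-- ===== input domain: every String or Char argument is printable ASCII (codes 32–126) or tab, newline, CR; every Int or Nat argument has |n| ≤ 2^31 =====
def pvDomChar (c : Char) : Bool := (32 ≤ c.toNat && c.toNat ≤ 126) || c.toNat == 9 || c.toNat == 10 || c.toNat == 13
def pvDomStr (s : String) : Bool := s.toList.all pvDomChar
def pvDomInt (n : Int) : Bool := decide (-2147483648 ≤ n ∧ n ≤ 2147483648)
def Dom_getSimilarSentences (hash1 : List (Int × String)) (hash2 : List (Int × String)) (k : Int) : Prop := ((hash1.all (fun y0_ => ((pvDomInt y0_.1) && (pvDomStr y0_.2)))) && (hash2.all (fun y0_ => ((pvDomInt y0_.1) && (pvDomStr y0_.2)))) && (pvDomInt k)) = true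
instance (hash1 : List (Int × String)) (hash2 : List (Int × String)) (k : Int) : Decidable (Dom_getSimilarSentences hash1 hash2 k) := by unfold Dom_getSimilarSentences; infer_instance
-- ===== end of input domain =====

-- B replaces A's per-distance-level re-scan of all hash pairs (recomputing every
-- Hamming distance at each of the k+1 levels) by one pass that buckets each pair
-- by its distance, then a flat greedy sweep per nonempty level; objective: faster.

-- shared helper (identical in both Pythons): number of differing chars over zip
def getStringDifference (s1 s2 : String) : Int :=
  ((s1.toList.zip s2.toList).map (fun p => if p.1 ≠ p.2 then (1 : Int) else 0)).sum

-- greedy state: (similarSentences, paired1, paired2)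
abbrev GssSt := List (Int × Int) × PySem.Set Int × PySem.Set Int

-- ===== PORT A =====
-- inner 'for idx2, sentenceHash2 in hash2: … break'
def gssInnerA (i idx : Int) (h : String) : List (Int × String) → GssSt → GssSt
  | [], st => st
  | (idx2, h2) :: rest, st =>
    if PySem.Set.contains st.2.2 idx2 = false then
      if getStringDifference h h2 = i then
        (st.1 ++ [(idx, idx2)], PySem.Set.add st.2.1 idx, PySem.Set.add st.2.2 idx2)
      else gssInnerA i idx h rest st
    else gssInnerA i idx h rest st

-- middle 'for idx, sentenceHash in hash1'
def gssLevelA (hash1 hash2 : List (Int × String)) (i : Int) (st : GssSt) : GssSt :=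
  hash1.foldl (fun st p =>
    if PySem.Set.contains st.2.1 p.1 = false then gssInnerA i p.1 p.2 hash2 st else st) st

def getSimilarSentences (hash1 : List (Int × String)) (hash2 : List (Int × String)) (k : Int) : List (Int × Int) :=
  ((PySem.List.pyRange 0 (k + 1) 1).foldl
    (fun st i => gssLevelA hash1 hash2 i st) ([], PySem.Set.empty, PySem.Set.empty)).1

-- ===== PORT B =====
-- buckets.setdefault(d, []).append((idx, idx2))  ==  buckets[d] = buckets.get(d, []) + [(idx, idx2)]
def gssBuckets (hash1 hash2 : List (Int × String)) (k : Int) : PySem.Dict Int (List (Int × Int)) :=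
  hash1.foldl (fun d p =>
    hash2.foldl (fun d q =>
      if getStringDifference p.2 q.2 ≤ k then
        d.modify (getStringDifference p.2 q.2) [] (· ++ [(p.1, q.1)])
      else d) d) PySem.Dict.empty

-- 'for idx, idx2 in buckets[d]: if idx not in paired1 and idx2 not in paired2: …'
def gssPassB (bucket : List (Int × Int)) (st : GssSt) : GssSt :=
  bucket.foldl (fun st p =>
    if PySem.Set.contains st.2.1 p.1 = false ∧ PySem.Set.contains st.2.2 p.2 = false then
      (st.1 ++ [p], PySem.Set.add st.2.1 p.1, PySem.Set.add st.2.2 p.2)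
    else st) st

def getSimilarSentences_alt (hash1 : List (Int × String)) (hash2 : List (Int × String)) (k : Int) : List (Int × Int) :=
  let buckets := gssBuckets hash1 hash2 k
  ((PySem.List.sorted buckets.keys (fun x => x) false).foldl
    (fun st d => gssPassB (buckets.getD d []) st) ([], PySem.Set.empty, PySem.Set.empty)).1

-- ===== PRECONDITION & SPEC =====
def Spec_getSimilarSentences (hash1 : List (Int × String)) (hash2 : List (Int × String)) (k : Int) (out : List (Int × Int)) : Prop := out = getSimilarSentences_alt hash1 hash2 k
instance (hash1 : List (Int × String)) (hash2 : List (Int × String)) (k : Int) (out : List (Int × Int)) : Decidable (Spec_getSimilarSentences hash1 hash2 k out) := by unfold Spec_getSimilarSentences; infer_instance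

-- ===== CLAIM (what is proved, stated in full; the proofs are below) =====
def Claim_equal_getSimilarSentences : Prop := ∀ (hash1 : List (Int × String)) (hash2 : List (Int × String)) (k : Int), Dom_getSimilarSentences hash1 hash2 k → Spec_getSimilarSentences hash1 hash2 k (getSimilarSentences hash1 hash2 k)

-- ===== LEMMAS AND PROOFS =====

-- the cross product (distance, (idx, idx2)) in hash1-major, hash2-minor order
def gssAll (hash1 hash2 : List (Int × String)) : List (Int × (Int × Int)) :=
  hash1.flatMap (fun p => hash2.map (fun q => (getStringDifference p.2 q.2, (p.1, q.1))))

-- the pairs at distance i, in that order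
def gssAt (hash1 hash2 : List (Int × String)) (i : Int) : List (Int × Int) :=
  ((gssAll hash1 hash2).filter (fun t => t.1 == i)).map (·.2)


-- --- gssPassB basics ---
lemma gssPassB_cons (x : Int × Int) (l : List (Int × Int)) (st : GssSt) :
    gssPassB (x :: l) st
      = gssPassB l (if PySem.Set.contains st.2.1 x.1 = false ∧ PySem.Set.contains st.2.2 x.2 = false
          then (st.1 ++ [x], PySem.Set.add st.2.1 x.1, PySem.Set.add st.2.2 x.2) else st) := rfl

lemma gssPassB_append (a b : List (Int × Int)) (st : GssSt) :
    gssPassB (a ++ b) st = gssPassB b (gssPassB a st) := by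
  unfold gssPassB; rw [List.foldl_append]

-- a level pass over pairs that all share an already-paired left index does nothing
lemma gssPassB_id (bucket : List (Int × Int)) (st : GssSt) (idx : Int)
    (h1 : ∀ p ∈ bucket, p.1 = idx) (h2 : idx ∈ st.2.1) :
    gssPassB bucket st = st := by
  induction bucket with
  | nil => rfl
  | cons p rest ih =>
    have hp : p.1 = idx := h1 p (by simp)
    have hc : PySem.Set.contains st.2.1 p.1 = true := by
      rw [hp]; exact (PySem.Set.contains_iff st.2.1 idx).2 h2
    rw [gssPassB_cons,
      if_neg (fun hcon => by rw [hcon.1] at hc; exact Bool.false_ne_true hc)]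
    exact ih (fun q hq => h1 q (List.mem_cons_of_mem _ hq))

lemma gssInnerA_cons (i idx : Int) (h : String) (q1 : Int) (q2 : String)
    (rest : List (Int × String)) (st : GssSt) :
    gssInnerA i idx h ((q1, q2) :: rest) st
      = if PySem.Set.contains st.2.2 q1 = false then
          if getStringDifference h q2 = i then
            (st.1 ++ [(idx, q1)], PySem.Set.add st.2.1 idx, PySem.Set.add st.2.2 q1)
          else gssInnerA i idx h rest st
        else gssInnerA i idx h rest st := rfl

-- every pair in one hash1 row of the bucket list has left index idx
lemma gss_row_fst (i idx : Int) (h : String) (hash2 : List (Int × String)) :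
    ∀ p ∈ ((hash2.map (fun q => (getStringDifference h q.2, (idx, q.1)))).filter
        (fun t => t.1 == i)).map (·.2), p.1 = idx := by
  intro p hp
  rw [List.mem_map] at hp
  obtain ⟨t, ht, rfl⟩ := hp
  rw [List.mem_filter] at ht
  obtain ⟨ht, -⟩ := ht
  rw [List.mem_map] at ht
  obtain ⟨q, -, rfl⟩ := ht
  rfl

-- one hash1 row: B's flat filtered pass equals A's break-on-first inner scan
lemma gss_row_eq (i idx : Int) (h : String) (hash2 : List (Int × String)) (st : GssSt) :
    gssPassB (((hash2.map (fun q => (getStringDifference h q.2, (idx, q.1)))).filter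
        (fun t => t.1 == i)).map (·.2)) st
      = if PySem.Set.contains st.2.1 idx = false then gssInnerA i idx h hash2 st else st := by
  induction hash2 generalizing st with
  | nil =>
    show st = _
    split <;> rfl
  | cons q rest ih =>
    obtain ⟨q1, q2⟩ := q
    simp only [List.map_cons, List.filter_cons, gssInnerA_cons]
    by_cases hd : getStringDifference h q2 = i
    · rw [if_pos (by simpa using hd)]
      simp only [List.map_cons]
      rw [gssPassB_cons]
      by_cases hp1 : PySem.Set.contains st.2.1 idx = false
      · by_cases hp2 : PySem.Set.contains st.2.2 q1 = false
        · rw [if_pos ⟨hp1, hp2⟩]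
          have hpair : idx ∈ PySem.Set.add st.2.1 idx :=
            (PySem.Set.mem_add st.2.1 idx idx).2 (Or.inr rfl)
          rw [gssPassB_id _ _ idx (gss_row_fst i idx h rest) hpair,
            if_pos hp1, if_pos hp2, if_pos hd]
        · rw [if_neg (fun hcon => hp2 hcon.2), ih st, if_pos hp1, if_pos hp1, if_neg hp2]
      · rw [if_neg (fun hcon => hp1 hcon.1), ih st, if_neg hp1, if_neg hp1]
    · rw [if_neg (by simpa using hd), ih st]
      by_cases hp1 : PySem.Set.contains st.2.1 idx = false
      · rw [if_pos hp1, if_pos hp1]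
        by_cases hp2 : PySem.Set.contains st.2.2 q1 = false
        · rw [if_pos hp2, if_neg hd]
        · rw [if_neg hp2]
      · rw [if_neg hp1, if_neg hp1]

-- gssAt distributes over a cons of hash1
lemma gssAt_cons (p : Int × String) (rest hash2 : List (Int × String)) (i : Int) :
    gssAt (p :: rest) hash2 i
      = ((hash2.map (fun q => (getStringDifference p.2 q.2, (p.1, q.1)))).filter
          (fun t => t.1 == i)).map (·.2) ++ gssAt rest hash2 i := by
  unfold gssAt gssAll
  simp [List.filter_append]

lemma gssLevelA_cons (p : Int × String) (rest hash2 : List (Int × String)) (i : Int) (st : GssSt) :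
    gssLevelA (p :: rest) hash2 i st
      = gssLevelA rest hash2 i
          (if PySem.Set.contains st.2.1 p.1 = false then gssInnerA i p.1 p.2 hash2 st else st) := rfl

-- A's whole level-i sweep equals B's flat pass over the pairs at distance i
lemma gss_level_eq (hash1 hash2 : List (Int × String)) (i : Int) (st : GssSt) :
    gssLevelA hash1 hash2 i st = gssPassB (gssAt hash1 hash2 i) st := by
  induction hash1 generalizing st with
  | nil => rfl
  | cons p rest ih =>
    rw [gssLevelA_cons, ih, gssAt_cons, gssPassB_append, gss_row_eq]

-- the filtered pair list the bucket dict is built from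
def gssL (hash1 hash2 : List (Int × String)) (k : Int) : List (Int × (Int × Int)) :=
  (gssAll hash1 hash2).filter (fun t => decide (t.1 ≤ k))

-- one hash1 row of the bucket-building loop, as a fold over the filtered pair list
lemma gss_row_buckets (p : Int × String) (hash2 : List (Int × String)) (k : Int)
    (d : PySem.Dict Int (List (Int × Int))) :
    hash2.foldl (fun d q =>
        if getStringDifference p.2 q.2 ≤ k then
          d.modify (getStringDifference p.2 q.2) [] (· ++ [(p.1, q.1)])
        else d) d
      = ((hash2.map (fun q => (getStringDifference p.2 q.2, (p.1, q.1)))).filter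
          (fun t => decide (t.1 ≤ k))).foldl (fun d t => d.modify t.1 [] (· ++ [t.2])) d := by
  induction hash2 generalizing d with
  | nil => rfl
  | cons q rest ih =>
    simp only [List.foldl_cons, List.map_cons, List.filter_cons]
    by_cases hq : getStringDifference p.2 q.2 ≤ k
    · rw [if_pos hq, if_pos (by simpa using hq)]
      simp only [List.foldl_cons]
      exact ih _
    · rw [if_neg hq, if_neg (by simpa using hq)]
      exact ih _

lemma gssBuckets_eq_foldl (hash1 hash2 : List (Int × String)) (k : Int) :
    gssBuckets hash1 hash2 k
      = (gssL hash1 hash2 k).foldl (fun d t => d.modify t.1 [] (· ++ [t.2])) PySem.Dict.empty := by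
  unfold gssBuckets gssL gssAll
  generalize PySem.Dict.empty = d0
  induction hash1 generalizing d0 with
  | nil => rfl
  | cons p rest ih =>
    simp only [List.foldl_cons, List.flatMap_cons, List.filter_append, List.foldl_append]
    rw [← ih, gss_row_buckets]

lemma gss_getD (hash1 hash2 : List (Int × String)) (k i : Int) (hik : i ≤ k) :
    (gssBuckets hash1 hash2 k).getD i [] = gssAt hash1 hash2 i := by
  rw [gssBuckets_eq_foldl, PySem.Dict.getD_foldl_modify_append]
  unfold gssL gssAt
  rw [PySem.Dict.getD_empty, List.filter_filter, List.nil_append]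
  congr 1
  apply List.filter_congr
  intro t _
  by_cases ht : t.1 = i
  · simp [ht, hik]
  · simp [ht]

lemma gss_keys (hash1 hash2 : List (Int × String)) (k : Int) :
    (gssBuckets hash1 hash2 k).keys
      = PySem.Set.ofList ((gssL hash1 hash2 k).map (·.1)) := by
  rw [gssBuckets_eq_foldl, PySem.Dict.keys_foldl_modify_key]
  simp [PySem.Dict.keys_empty, PySem.Set.update_nil_left]

lemma gss_diff_nonneg (s1 s2 : String) : 0 ≤ getStringDifference s1 s2 := by
  unfold getStringDifference
  apply List.sum_nonneg
  intro x hx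
  simp only [List.mem_map] at hx
  obtain ⟨p, -, rfl⟩ := hx
  split <;> norm_num

lemma gss_mem_all_nonneg (hash1 hash2 : List (Int × String)) (t : Int × (Int × Int))
    (ht : t ∈ gssAll hash1 hash2) : 0 ≤ t.1 := by
  unfold gssAll at ht
  simp only [List.mem_flatMap, List.mem_map] at ht
  obtain ⟨p, -, q, -, rfl⟩ := ht
  exact gss_diff_nonneg _ _

-- an i with no pair at distance i (among distances ≤ k) has an empty level
lemma gssAt_eq_nil (hash1 hash2 : List (Int × String)) (k i : Int) (hik : i ≤ k)
    (hni : i ∉ (gssL hash1 hash2 k).map (·.1)) :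
    gssAt hash1 hash2 i = [] := by
  unfold gssAt
  rw [List.map_eq_nil_iff, List.filter_eq_nil_iff]
  intro t ht hti
  apply hni
  simp only [beq_iff_eq] at hti
  simp only [gssL, List.mem_map, List.mem_filter]
  exact ⟨t, ⟨ht, by simp; omega⟩, hti⟩

-- the two top-level loops agree
lemma gss_folds_eq (hash1 hash2 : List (Int × String)) (k : Int) :
    List.foldl (fun st i => gssLevelA hash1 hash2 i st)
        ([], PySem.Set.empty, PySem.Set.empty) (PySem.List.pyRange 0 (k + 1) 1)
      = List.foldl (fun st d => gssPassB ((gssBuckets hash1 hash2 k).getD d []) st)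
          ([], PySem.Set.empty, PySem.Set.empty)
          (PySem.List.sorted (PySem.Set.ofList ((gssL hash1 hash2 k).map (·.1)))
            (fun x => x) false) := by
  have hdists : ∀ i ∈ (gssL hash1 hash2 k).map (·.1), 0 ≤ i ∧ i ≤ k := by
    intro i hi
    simp only [gssL, List.mem_map, List.mem_filter] at hi
    obtain ⟨t, ⟨hta, htk⟩, rfl⟩ := hi
    exact ⟨gss_mem_all_nonneg _ _ _ hta, by simpa using htk⟩
  have hB : List.foldl (fun st d => gssPassB ((gssBuckets hash1 hash2 k).getD d []) st)
        ([], PySem.Set.empty, PySem.Set.empty)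
        (PySem.List.sorted (PySem.Set.ofList ((gssL hash1 hash2 k).map (·.1))) (fun x => x) false)
      = List.foldl (fun st d => gssPassB (gssAt hash1 hash2 d) st)
          ([], PySem.Set.empty, PySem.Set.empty)
          (PySem.List.sorted (PySem.Set.ofList ((gssL hash1 hash2 k).map (·.1)))
            (fun x => x) false) := by
    apply PySem.List.foldl_congr_mem
    intro st d hd
    show gssPassB ((gssBuckets hash1 hash2 k).getD d []) st = gssPassB (gssAt hash1 hash2 d) st
    rw [gss_getD _ _ _ _ (hdists d ((PySem.Set.mem_ofList _ _).1
      ((PySem.List.mem_sorted _ _ _ _).1 hd))).2]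
  have hA : List.foldl (fun st i => gssLevelA hash1 hash2 i st)
        ([], PySem.Set.empty, PySem.Set.empty) (PySem.List.pyRange 0 (k + 1) 1)
      = List.foldl (fun st i =>
            if i ∈ PySem.Set.ofList ((gssL hash1 hash2 k).map (·.1)) then
              gssPassB (gssAt hash1 hash2 i) st else st)
          ([], PySem.Set.empty, PySem.Set.empty) (PySem.List.pyRange 0 (k + 1) 1) := by
    apply PySem.List.foldl_congr_mem
    intro st i hi
    show gssLevelA hash1 hash2 i st
        = if i ∈ PySem.Set.ofList ((gssL hash1 hash2 k).map (·.1)) then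
            gssPassB (gssAt hash1 hash2 i) st else st
    rw [gss_level_eq]
    by_cases hmem : i ∈ PySem.Set.ofList ((gssL hash1 hash2 k).map (·.1))
    · rw [if_pos hmem]
    · rw [if_neg hmem,
        gssAt_eq_nil hash1 hash2 k i
          (by have := (PySem.List.mem_pyRange_one).1 hi; omega)
          (fun hm => hmem ((PySem.Set.mem_ofList _ _).2 hm))]
      rfl
  rw [hA, hB, PySem.List.foldl_ite_eq_foldl_filter]
  refine congrArg (List.foldl (fun st i => gssPassB (gssAt hash1 hash2 i) st)
    ([], PySem.Set.empty, PySem.Set.empty)) ?_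
  refine (PySem.List.sorted_eq_of_perm_of_pairwise_lt _ _ _ ?_ ?_).symm
  · rw [List.perm_ext_iff_of_nodup
      ((PySem.List.nodup_pyRange_one 0 (k + 1)).filter _) (PySem.Set.nodup_ofList _)]
    intro i
    simp only [List.mem_filter, PySem.List.mem_pyRange_one, decide_eq_true_eq,
      PySem.Set.mem_ofList]
    constructor
    · rintro ⟨-, hi⟩; exact hi
    · intro hi
      have := hdists i hi
      exact ⟨by omega, hi⟩
  · exact (PySem.List.pairwise_lt_pyRange_one 0 (k + 1)).filter _

theorem getSimilarSentences_spec : Claim_equal_getSimilarSentences := by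
  intro hash1 hash2 k _
  unfold Spec_getSimilarSentences getSimilarSentences getSimilarSentences_alt
  dsimp only
  rw [gss_keys]
  exact congrArg (·.1) (gss_folds_eq hash1 hash2 k)
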